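-- pv_equiv track=rewrite | github.com/RugvedKatole/Intelligent_Intersection_management | Four_way/AIM.py | group_keys
-- ===== SOURCE A (Python) =====
-- def group_keys(keys):
--     grouped_dict = {}
--     for key in keys:
--         starting_letter = key[0]
--         if starting_letter in grouped_dict:
--             grouped_dict[starting_letter].append(key)
--         else:
--             grouped_dict[starting_letter] = [key]
--
--     grouped_list = list(grouped_dict.values())
--     return grouped_list
-- ===== SOURCE B (Python) =====
-- def group_keys(keys):
--     # index-first strategy: collect distinct starting letters in first-appearance
--     # order, then build each group by filtering the whole key list.
--     letters = []
--     for k in keys: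
--         c = k[0]
--         if c not in letters:
--             letters.append(c)
--     return [[k for k in keys if k[0] == letter] for letter in letters]
-- ===== Notes on version B (the rewrite author's own statement) =====
-- stated objective: alternative
-- what changed: Replaces single-pass dict bucketing with an index-first pass that lists distinct starting letters in first-appearance order and then builds each group by filtering the key list, keeping no dict of lists.
import Mathlib
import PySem

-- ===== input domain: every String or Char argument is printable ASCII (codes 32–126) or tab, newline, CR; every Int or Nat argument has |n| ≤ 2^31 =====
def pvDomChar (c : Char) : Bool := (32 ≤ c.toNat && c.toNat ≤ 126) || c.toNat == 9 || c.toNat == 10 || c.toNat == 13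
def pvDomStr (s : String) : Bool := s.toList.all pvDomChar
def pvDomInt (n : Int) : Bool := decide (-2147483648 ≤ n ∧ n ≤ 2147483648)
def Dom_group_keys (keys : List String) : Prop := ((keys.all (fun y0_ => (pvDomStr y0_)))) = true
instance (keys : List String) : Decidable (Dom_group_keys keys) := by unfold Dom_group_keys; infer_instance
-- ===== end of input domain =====

-- B replaces A's dict bucketing by an index-first pass (distinct first letters in order)
-- followed by one filter per letter; equivalence on key lists without empty strings.

-- ===== PORT A =====
def group_keys (keys : List String) : List (List String) :=
  let grouped_dict : PySem.Dict Char (List String) :=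
    keys.foldl (fun d key =>
      match PySem.Str.pyGet? key 0 with
      | none => d        -- key[0] raises IndexError in Python; excluded by Pre_
      | some starting_letter =>
          if d.contains starting_letter then
            d.modify starting_letter [] (fun g => g ++ [key])   -- grouped_dict[c].append(key)
          else
            d.insert starting_letter [key]) PySem.Dict.empty
  grouped_dict.values

-- ===== PORT B =====
def group_keys_alt (keys : List String) : List (List String) :=
  let letters : List Char :=
    keys.foldl (fun acc k =>
      match PySem.Str.pyGet? k 0 with
      | none => acc      -- k[0] raises IndexError in Python; excluded by Pre_
      | some c => if c ∈ acc then acc else acc ++ [c]) []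
  letters.map (fun letter => keys.filter (fun k => PySem.Str.pyGet? k 0 == some letter))

-- ===== PRECONDITION & SPEC =====
-- Pre_ excludes key lists containing the empty string, on which both Pythons raise IndexError.
def Pre_group_keys (keys : List String) : Prop := "" ∉ keys
instance (keys : List String) : Decidable (Pre_group_keys keys) := by unfold Pre_group_keys; infer_instance
def pvWitness_group_keys : List String := ["apple", "ant", "bat", "cow", "bee"]

def Spec_group_keys (keys : List String) (out : List (List String)) : Prop := out = group_keys_alt keys
instance (keys : List String) (out : List (List String)) : Decidable (Spec_group_keys keys out) := by unfold Spec_group_keys; infer_instance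

-- ===== CLAIM (what is proved, stated in full; the proofs are below) =====
def Claim_equal_group_keys : Prop := ∀ (keys : List String), Dom_group_keys keys → Pre_group_keys keys → Spec_group_keys keys (group_keys keys)

-- ===== LEMMAS AND PROOFS =====

-- the first character of a nonempty string (total helper, used only in the proofs)
def pvFc (s : String) : Char := s.toList.headI

theorem pvGet0 (s : String) (hs : s ≠ "") : PySem.Str.pyGet? s 0 = some (pvFc s) := by
  have h : s.toList ≠ [] := by
    intro hnil; apply hs
    have := congrArg String.ofList hnil
    simpa using this
  simp [PySem.Str.pyGet?, PySem.List.pyGet?_zero, pvFc]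
  cases hl : s.toList with
  | nil => exact absurd hl h
  | cons a t => simp

theorem pv_modify_eq_insert (d : PySem.Dict Char (List String)) (k : Char) (f : List String → List String) :
    d.modify k [] f = d.insert k (f (d.getD k [])) := by
  simp [PySem.Dict.modify]

-- A's dict equals the pure grouping fold (under Pre_)
theorem pvA_dict (keys : List String) (h : "" ∉ keys) :
    (keys.foldl (fun d key =>
      match PySem.Str.pyGet? key 0 with
      | none => d
      | some starting_letter =>
          if d.contains starting_letter then
            d.modify starting_letter [] (fun g => g ++ [key])
          else
            d.insert starting_letter [key]) PySem.Dict.empty)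
    = keys.foldl (fun d key => d.modify (pvFc key) [] (fun g => g ++ [key])) PySem.Dict.empty := by
  apply PySem.List.foldl_congr_mem
  intro d key hk
  rw [pvGet0 key (by rintro rfl; exact h hk)]
  by_cases hc : d.contains (pvFc key)
  · simp [hc]
  · simp only [hc, Bool.false_eq_true, if_false]
    rw [pv_modify_eq_insert, PySem.Dict.getD_of_not_contains d [] (by simpa using hc)]
    simp

-- B's letters equal the set of first characters (under Pre_)
theorem pvB_letters (keys : List String) (h : "" ∉ keys) :
    (keys.foldl (fun acc k =>
      match PySem.Str.pyGet? k 0 with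
      | none => acc
      | some c => if c ∈ acc then acc else acc ++ [c]) [])
    = PySem.Set.ofList (keys.map pvFc) := by
  have h1 : (keys.foldl (fun acc k =>
      match PySem.Str.pyGet? k 0 with
      | none => acc
      | some c => if c ∈ acc then acc else acc ++ [c]) [])
      = keys.foldl (fun acc k => PySem.Set.add acc (pvFc k)) [] := by
    apply PySem.List.foldl_congr_mem
    intro acc k hk
    rw [pvGet0 k (by rintro rfl; exact h hk), PySem.Set.add_eq_ite]
  rw [h1, ← PySem.Set.update_map_eq_foldl_add, PySem.Set.update_nil_left]

theorem group_keys_eq (keys : List String) (h : "" ∉ keys) :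
    group_keys keys = group_keys_alt keys := by
  unfold group_keys group_keys_alt
  rw [pvA_dict keys h, pvB_letters keys h]
  set D := keys.foldl (fun d key => d.modify (pvFc key) [] (fun g => g ++ [key])) PySem.Dict.empty with hD
  have hpair : D = (keys.map (fun k => (pvFc k, k))).foldl
      (fun d p => d.modify p.1 [] (fun g => g ++ [p.2])) PySem.Dict.empty := by
    rw [List.foldl_map]
  have hnd : D.keys.Nodup := by
    rw [hD]
    exact PySem.Dict.nodup_keys_foldl_modify_key keys pvFc [] (fun _ k => (fun g => g ++ [k]))
      PySem.Dict.empty (by simp)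
  have hkeys : D.keys = PySem.Set.ofList (keys.map pvFc) := by
    rw [hD, PySem.Dict.keys_foldl_modify_key]
    simp [PySem.Set.update_nil_left, PySem.Dict.keys_empty]
  have hgetD : ∀ c, D.getD c [] = keys.filter (fun k => pvFc k == c) := by
    intro c
    rw [hpair, PySem.Dict.getD_foldl_modify_append, PySem.Dict.getD_empty]
    rw [List.filter_map, List.map_map]
    simp [Function.comp_def]
  rw [PySem.Dict.values_eq_map_keys D hnd [], hkeys]
  apply List.map_congr_left
  intro c _
  rw [hgetD c]
  apply List.filter_congr
  intro k hk
  rw [pvGet0 k (by rintro rfl; exact h hk)]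
  simp

-- ===== VERDICT (by name: the statement is the Claim_ definition above) =====
theorem group_keys_spec : Claim_equal_group_keys := by
  intro keys _ hpre
  unfold Spec_group_keys
  exact group_keys_eq keys hpre
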